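-- pv_equiv track=rewrite | github.com/Akim-Delli/classicCS | boost2.py | rollTheString
-- ===== SOURCE A (Python) =====
-- import string
--
-- def rollTheString(s, roll):
--     """
--         Function to rotate by one character a consecutive number of characters of a string
--         based on a sequence a character number
--         eg : inputs :"abc" and [ 3, 2, 1] : "abc" -> "bcd" -> "cdd" -> "ddd"
--            : output : "ddd"
--
--         :param s: str
--         :param roll: List[int]
--         :return: word transformed: str
--     """
--
--     # number of rotation to perform per character
--     character_shift = []
--     roll_without_zero = roll
--
--     # TODO this loop can be improved
--     while roll_without_zero:
--         character_shift.append(len(roll_without_zero))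
--         A = list(map(lambda x: x - 1, roll_without_zero))
--         roll_without_zero = [x for x in A if x]
--
--     word = []
--     for i, c in enumerate(s):
--
--         if i < len(character_shift):
--             # apply the x number of rotation only once per character in the string
--             word.append(string.ascii_lowercase[(string.ascii_lowercase.index(c) + character_shift[i]) % 26])
--         else:
--             word += s[i:]
--             break
--
--     return "".join(word)
-- ===== SOURCE B (Python) =====
-- def rollTheString(s, roll):
--     # histogram + running suffix count: shift for index i = #{x in roll : x > i}
--     L = max(roll, default=0)
--     n = min(len(s), L)
--     hist = [0] * (n + 1)
--     for x in roll:
--         if x <= n: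
--             hist[x] += 1
--     out = []
--     remaining = len(roll)
--     for i in range(n):
--         out.append(chr(ord('a') + (ord(s[i]) - ord('a') + remaining) % 26))
--         remaining -= hist[i + 1]
--     return "".join(out) + s[n:]
-- ===== Notes on version B (the rewrite author's own statement) =====
-- stated objective: faster
-- what changed: A rebuilds the whole roll list max(roll) times (decrement all, drop zeros) to count survivors per step; B builds a histogram of roll values once and derives each index's shift by a running suffix count, then rotates in a single pass.
-- outside the precondition, e.g. on rollTheString('ab', [0]): A does not finish within the time limit, B returns 'ab'; on rollTheString('aB', [2, 2]): A raises ValueError, B returns 'cx'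
import Mathlib
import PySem

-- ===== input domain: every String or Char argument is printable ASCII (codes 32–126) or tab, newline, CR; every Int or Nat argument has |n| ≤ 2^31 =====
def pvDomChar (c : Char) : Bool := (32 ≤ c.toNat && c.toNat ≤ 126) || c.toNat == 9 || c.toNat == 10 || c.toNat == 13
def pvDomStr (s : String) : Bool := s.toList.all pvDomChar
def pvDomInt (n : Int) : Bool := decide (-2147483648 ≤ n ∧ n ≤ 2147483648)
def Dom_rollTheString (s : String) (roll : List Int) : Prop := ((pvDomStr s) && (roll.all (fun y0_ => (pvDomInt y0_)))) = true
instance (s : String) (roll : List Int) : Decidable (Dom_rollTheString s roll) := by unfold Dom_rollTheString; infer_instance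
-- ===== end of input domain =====

-- B replaces A's repeated decrement-and-filter sweeps over roll by a histogram of roll
-- values plus a running suffix count, computing every character's shift in one pass (objective: faster).


-- ===== PORT A =====
def pvLowercase : List Char := "abcdefghijklmnopqrstuvwxyz".toList

-- string.ascii_lowercase[(string.ascii_lowercase.index(c) + sh) % 26]
-- (the .getD defaults are never reached: under Pre_ the index exists and the %26 result is in range)
def pvShiftChar (c : Char) (sh : Int) : Char :=
  PySem.List.pyGetD pvLowercase
    (PySem.Int.mod ((((PySem.List.index? pvLowercase c).getD 0 : Nat) : Int) + sh) 26) 'a'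

-- the 'while roll_without_zero' loop; fuel = max(roll) bounds the iteration count (Python
-- diverges when some roll element is ≤ 0; those inputs are outside Pre_)
def pvShiftLoopA (fuel : Nat) (r : List Int) : List Int :=
  match fuel with
  | 0 => []
  | f + 1 =>
    if r.isEmpty then []
    else (r.length : Int) :: pvShiftLoopA f ((r.map (· - 1)).filter (fun x => x ≠ 0))

-- the 'for i, c in enumerate(s)' loop with its break (rest = s[i:] throughout)
def pvWordLoopA (shift : List Int) (i : Nat) (rest : List Char) : List Char :=
  match rest with
  | [] => []
  | c :: cs =>
    if i < shift.length then pvShiftChar c (shift.getD i 0) :: pvWordLoopA shift (i + 1) cs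
    else c :: cs

def rollTheString (s : String) (roll : List Int) : String :=
  let character_shift := pvShiftLoopA (roll.foldl (fun a x => max a x.toNat) 0) roll
  String.ofList (pvWordLoopA character_shift 0 s.toList)

-- ===== PORT B =====
def rollTheString_alt (s : String) (roll : List Int) : String :=
  let L : Int := PySem.List.maxD roll (fun x => x) 0
  let n : Int := min (s.toList.length : Int) L
  let hist : List Int := roll.foldl
    (fun h x => if x ≤ n then PySem.List.pySetD h x (PySem.List.pyGetD h x 0 + 1) else h)
    (List.replicate (n.toNat + 1) (0 : Int))
  let st := (PySem.List.pyRange 0 n 1).foldl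
    (fun (p : List Char × Int) i =>
      (p.1 ++ [Char.ofNat (('a'.toNat : Int)
          + PySem.Int.mod (((PySem.List.pyGetD s.toList i ' ').toNat : Int) - ('a'.toNat : Int) + p.2) 26).toNat],
       p.2 - PySem.List.pyGetD hist (i + 1) 0))
    ([], (roll.length : Int))
  String.ofList (st.1 ++ PySem.List.slice s.toList (some n) none)

-- ===== PRECONDITION & SPEC =====
-- Pre_ excludes inputs where Python A does not return: a roll element ≤ 0 makes A's while
-- loop run forever, and a non-lowercase character among the first max(roll) characters of s
-- makes string.ascii_lowercase.index raise ValueError.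
def Pre_rollTheString (s : String) (roll : List Int) : Prop :=
  (roll.all (fun x => decide (1 ≤ x) &&
     (s.toList.take x.toNat).all (fun c => decide (97 ≤ c.toNat) && decide (c.toNat ≤ 122)))) = true
instance (s : String) (roll : List Int) : Decidable (Pre_rollTheString s roll) := by
  unfold Pre_rollTheString; infer_instance

def pvWitness_rollTheString : String × List Int := ("abc", [3, 2, 1])

def Spec_rollTheString (s : String) (roll : List Int) (out : String) : Prop := out = rollTheString_alt s roll
instance (s : String) (roll : List Int) (out : String) : Decidable (Spec_rollTheString s roll out) := by unfold Spec_rollTheString; infer_instance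

-- ===== CLAIM (what is proved, stated in full; the proofs are below) =====
def Claim_equal_rollTheString : Prop := ∀ (s : String) (roll : List Int), Dom_rollTheString s roll → Pre_rollTheString s roll → Spec_rollTheString s roll (rollTheString s roll)

-- ===== LEMMAS AND PROOFS =====

-- the per-index shift both programs apply: how many roll entries exceed the index
def pvCnt (roll : List Int) (k : Int) : Int := (roll.countP (fun x => decide (k < x)) : Int)

-- ---- generic max facts ----
lemma pv_foldl_max_le (l : List Int) (a b : Int) (ha : a ≤ b) (hl : ∀ x ∈ l, x ≤ b) :
    l.foldl max a ≤ b := by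
  induction l generalizing a with
  | nil => exact ha
  | cons y t ih =>
      exact ih (max a y) (max_le ha (hl y (List.mem_cons_self))) (fun x hx => hl x (List.mem_cons_of_mem _ hx))

lemma pv_one_le_foldl_max (l : List Int) (hne : l ≠ []) (h1 : ∀ x ∈ l, 1 ≤ x) :
    1 ≤ l.foldl max 0 := by
  cases l with
  | nil => exact absurd rfl hne
  | cons y t =>
      have hy : y ≤ (y :: t).foldl max 0 := (PySem.List.le_foldl_max _ _).2 y (List.mem_cons_self)
      exact le_trans (h1 y (List.mem_cons_self)) hy

-- max of the decremented-filtered list drops by exactly one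
lemma pv_maxdec (r : List Int) (hne : r ≠ []) (h1 : ∀ x ∈ r, 1 ≤ x) :
    ((r.map (· - 1)).filter (fun x => x ≠ 0)).foldl max 0 = r.foldl max 0 - 1 := by
  have hM1 : 1 ≤ r.foldl max 0 := pv_one_le_foldl_max r hne h1
  have hub : ∀ x ∈ r, x ≤ r.foldl max 0 := (PySem.List.le_foldl_max r 0).2
  apply le_antisymm
  · apply pv_foldl_max_le _ _ _ (by omega)
    intro x hx
    simp only [List.mem_filter, List.mem_map] at hx
    obtain ⟨⟨y, hy, rfl⟩, _⟩ := hx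
    have := hub y hy; omega
  · by_cases h2 : 2 ≤ r.foldl max 0
    · have hmem : r.foldl max 0 ∈ r := by
        rcases PySem.List.foldl_max_mem r 0 with h | h
        · omega
        · exact h
      have hmem' : r.foldl max 0 - 1 ∈ (r.map (· - 1)).filter (fun x => x ≠ 0) := by
        simp only [List.mem_filter, List.mem_map]
        refine ⟨⟨r.foldl max 0, hmem, rfl⟩, by simp; omega⟩
      have := (PySem.List.le_foldl_max ((r.map (· - 1)).filter (fun x => x ≠ 0)) 0).2 _ hmem'
      omega
    · have := (PySem.List.le_foldl_max ((r.map (· - 1)).filter (fun x => x ≠ 0)) 0).1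
      omega

-- counting survivors above k in the decremented list = counting above k+1 in the original
lemma pv_countdec (l : List Int) (k : Int) (hk : 0 ≤ k) (h1 : ∀ x ∈ l, 1 ≤ x) :
    ((l.map (· - 1)).filter (fun x => x ≠ 0)).countP (fun x => decide (k < x))
      = l.countP (fun x => decide (k + 1 < x)) := by
  induction l with
  | nil => rfl
  | cons y t ih =>
      have hy := h1 y (List.mem_cons_self)
      have ih' := ih (fun x hx => h1 x (List.mem_cons_of_mem _ hx))
      simp only [ne_eq, decide_not] at ih' ⊢
      simp only [List.map_cons, List.filter_cons]
      by_cases hz : y - 1 = 0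
      · have hlt : ¬ (k + 1 < y) := by omega
        simp [hz, hlt, ih']
      · have h2 : (k < y - 1) ↔ (k + 1 < y) := by omega
        simp [hz, List.countP_cons, ih', h2]

lemma pv_cnt_split (l : List Int) (a : Int) :
    l.countP (fun x => decide (a < x))
      = l.countP (fun x => decide (a + 1 < x)) + l.countP (fun x => x == a + 1) := by
  induction l with
  | nil => rfl
  | cons y t ih =>
      simp only [List.countP_cons, ih]
      by_cases hy : y = a + 1
      · subst hy; simp; omega
      · have h1 : (y == a + 1) = false := by simp [hy]
        have h2 : (a < y) ↔ (a + 1 < y) := by omega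
        simp [h1, h2]; omega

-- A's while loop produces the list of survivor counts, indexed 0 .. max(roll)-1
lemma pv_shiftA_spec (fuel : Nat) (r : List Int)
    (h : ∀ x ∈ r, 1 ≤ x ∧ x ≤ (fuel : Int)) :
    pvShiftLoopA fuel r
      = (List.range (r.foldl max 0).toNat).map (fun (k : Nat) => (r.countP (fun x => decide ((k : Int) < x)) : Int)) := by
  induction fuel generalizing r with
  | zero =>
      have hr : r = [] := by
        cases r with
        | nil => rfl
        | cons y t =>
            obtain ⟨hy1, hy2⟩ := h y (List.mem_cons_self)
            exfalso
            omega
      subst hr; rfl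
  | succ f ih =>
      by_cases hr : r = []
      · subst hr; rfl
      · have h1 : ∀ x ∈ r, 1 ≤ x := fun x hx => (h x hx).1
        have hM1 : 1 ≤ r.foldl max 0 := pv_one_le_foldl_max r hr h1
        have hne : r.isEmpty = false := by simp [hr]
        simp only [pvShiftLoopA, hne, Bool.false_eq_true, if_false]
        have hr' : ∀ x ∈ (r.map (· - 1)).filter (fun x => x ≠ 0), 1 ≤ x ∧ x ≤ (f : Int) := by
          intro x hx
          simp only [List.mem_filter, List.mem_map] at hx
          obtain ⟨⟨y, hy, rfl⟩, hnz⟩ := hx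
          have h1y := (h y hy).1
          have h2y := (h y hy).2
          simp only [ne_eq, decide_eq_true_eq] at hnz
          constructor <;> [omega; (push_cast at h2y ⊢; omega)]
        rw [ih _ hr', pv_maxdec r hr h1]
        have hsplit : (r.foldl max 0).toNat = (r.foldl max 0 - 1).toNat + 1 := by omega
        rw [hsplit, List.range_succ_eq_map, List.map_cons, List.map_map]
        congr 1
        · have hall : ∀ x ∈ r, (fun x => decide ((((0 : Nat)) : Int) < x)) x = true := by
            intro x hx
            simp only [decide_eq_true_eq]
            have := h1 x hx
            push_cast
            omega
          rw [List.countP_eq_length.2 hall]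
        · apply List.map_congr_left
          intro k hk
          simp only [Function.comp_apply, Nat.succ_eq_add_one]
          rw [pv_countdec r (k : Int) (by omega) h1]
          norm_cast

-- A's word loop in closed form
lemma pv_wordA_spec (shift : List Int) (rest : List Char) (i : Nat) :
    pvWordLoopA shift i rest
      = (List.range (min rest.length (shift.length - i))).map
          (fun k => pvShiftChar (rest.getD k ' ') (shift.getD (i + k) 0))
        ++ rest.drop (shift.length - i) := by
  induction rest generalizing i with
  | nil => simp [pvWordLoopA]
  | cons c cs ih =>
      simp only [pvWordLoopA]
      by_cases hi : i < shift.length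
      · rw [if_pos hi, ih (i + 1)]
        have hmin : min (c :: cs).length (shift.length - i)
            = (min cs.length (shift.length - (i + 1))) + 1 := by
          simp only [List.length_cons]; omega
        have hdrop : (c :: cs).drop (shift.length - i) = cs.drop (shift.length - (i + 1)) := by
          have : shift.length - i = (shift.length - (i + 1)) + 1 := by omega
          rw [this, List.drop_succ_cons]
        rw [hmin, hdrop, List.range_succ_eq_map]
        simp only [List.map_cons, List.map_map, List.cons_append]
        congr 1
        congr 1
        apply List.map_congr_left
        intro k hk
        simp only [Function.comp_apply, Nat.succ_eq_add_one, List.getD_cons_succ]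
        have h : i + 1 + k = i + (k + 1) := by omega
        rw [h]
      · rw [if_neg hi]
        have h0 : shift.length - i = 0 := by omega
        simp [h0]

-- B's histogram: length invariant and entry values
lemma pv_hist_len (n : Int) (r : List Int) (h : List Int) :
    (r.foldl (fun h x => if x ≤ n then PySem.List.pySetD h x (PySem.List.pyGetD h x 0 + 1) else h) h).length
      = h.length := by
  induction r generalizing h with
  | nil => rfl
  | cons x t ih =>
      simp only [List.foldl_cons]
      by_cases hx : x ≤ n
      · rw [if_pos hx, ih, PySem.List.length_pySetD]
      · rw [if_neg hx, ih]

lemma pv_hist_get (n : Int) (r : List Int) (h : List Int) (j : Int)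
    (h1 : ∀ x ∈ r, 1 ≤ x) (hj0 : 0 ≤ j) (hjn : j ≤ n) (hlen : h.length = n.toNat + 1) (hn : 0 ≤ n) :
    PySem.List.pyGetD
        (r.foldl (fun h x => if x ≤ n then PySem.List.pySetD h x (PySem.List.pyGetD h x 0 + 1) else h) h) j 0
      = PySem.List.pyGetD h j 0 + (r.countP (fun x => x == j) : Int) := by
  induction r generalizing h with
  | nil => simp
  | cons x t ih =>
      have hx1 : 1 ≤ x := h1 x (List.mem_cons_self)
      have ht1 : ∀ y ∈ t, 1 ≤ y := fun y hy => h1 y (List.mem_cons_of_mem _ hy)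
      simp only [List.foldl_cons]
      by_cases hxn : x ≤ n
      · rw [if_pos hxn]
        have hlen' : (PySem.List.pySetD h x (PySem.List.pyGetD h x 0 + 1)).length = n.toNat + 1 := by
          rw [PySem.List.length_pySetD, hlen]
        rw [ih _ ht1 hlen']
        have hjlen : j < ((PySem.List.pySetD h x (PySem.List.pyGetD h x 0 + 1)).length : Int) := by
          rw [hlen']; omega
        have hget : PySem.List.pyGetD (PySem.List.pySetD h x (PySem.List.pyGetD h x 0 + 1)) j 0
            = if x = j then PySem.List.pyGetD h j 0 + 1 else PySem.List.pyGetD h j 0 := by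
          rw [PySem.List.pySetD_of_nonneg h _ (by omega)]
          rw [PySem.List.pyGetD_eq_getElem _ 0 hj0 (by simp [List.length_set]; omega)]
          rw [List.getElem_set]
          by_cases hxj : x = j
          · subst hxj
            simp
          · have : ¬ (x.toNat = j.toNat) := by omega
            rw [if_neg this, if_neg hxj, PySem.List.pyGetD_eq_getElem _ 0 hj0 (by rw [hlen]; omega)]
        rw [hget, List.countP_cons]
        by_cases hxj : x = j
        · subst hxj; simp; omega
        · have : (x == j) = false := by simp [hxj]
          simp [hxj, this]
      · rw [if_neg hxn]
        rw [ih _ ht1 hlen, List.countP_cons]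
        have : (x == j) = false := by simp; omega
        simp [this]

-- B's main loop in closed form: the running counter is always pvCnt roll a
lemma pv_bloop (cs : List Char) (hist : List Int) (roll : List Int) (n : Int)
    (hhist : ∀ j : Int, 1 ≤ j → j ≤ n → PySem.List.pyGetD hist j 0 = (roll.countP (fun x => x == j) : Int)) :
    ∀ (a : Int), 0 ≤ a → a ≤ n → ∀ (w : List Char),
    ((PySem.List.pyRange a n 1).foldl
      (fun (p : List Char × Int) i =>
        (p.1 ++ [Char.ofNat (('a'.toNat : Int)
            + PySem.Int.mod (((PySem.List.pyGetD cs i ' ').toNat : Int) - ('a'.toNat : Int) + p.2) 26).toNat],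
         p.2 - PySem.List.pyGetD hist (i + 1) 0))
      (w, pvCnt roll a)).1
    = w ++ (PySem.List.pyRange a n 1).map
        (fun i => Char.ofNat (('a'.toNat : Int)
            + PySem.Int.mod (((PySem.List.pyGetD cs i ' ').toNat : Int) - ('a'.toNat : Int) + pvCnt roll i) 26).toNat) := by
  have key : ∀ (m : Nat) (a : Int), 0 ≤ a → a ≤ n → (n - a).toNat = m → ∀ (w : List Char),
      ((PySem.List.pyRange a n 1).foldl
        (fun (p : List Char × Int) i =>
          (p.1 ++ [Char.ofNat (('a'.toNat : Int)
              + PySem.Int.mod (((PySem.List.pyGetD cs i ' ').toNat : Int) - ('a'.toNat : Int) + p.2) 26).toNat],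
           p.2 - PySem.List.pyGetD hist (i + 1) 0))
        (w, pvCnt roll a)).1
      = w ++ (PySem.List.pyRange a n 1).map
          (fun i => Char.ofNat (('a'.toNat : Int)
              + PySem.Int.mod (((PySem.List.pyGetD cs i ' ').toNat : Int) - ('a'.toNat : Int) + pvCnt roll i) 26).toNat) := by
    intro m
    induction m with
    | zero =>
        intro a ha0 han hm w
        have : n ≤ a := by omega
        rw [PySem.List.pyRange_one_eq_nil this]
        simp
    | succ m ihm =>
        intro a ha0 han hm w
        have haltn : a < n := by omega
        rw [PySem.List.pyRange_one_cons haltn]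
        simp only [List.foldl_cons, List.map_cons]
        have hstep : pvCnt roll a - PySem.List.pyGetD hist (a + 1) 0 = pvCnt roll (a + 1) := by
          rw [hhist (a + 1) (by omega) (by omega)]
          unfold pvCnt
          rw [pv_cnt_split roll a]
          push_cast
          ring
        rw [hstep]
        rw [ihm (a + 1) (by omega) (by omega) (by omega)]
        simp
  intro a ha0 han w
  exact key (n - a).toNat a ha0 han rfl w

-- table facts about the 26-letter alphabet
lemma pv_alpha_get (u : Nat) (hu : u < 26) :
    PySem.List.pyGetD pvLowercase ((u : Nat) : Int) 'a' = Char.ofNat (97 + u) := by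
  revert hu; revert u; decide

lemma pv_alpha_index (u : Nat) (hu : u < 26) :
    PySem.List.index? pvLowercase (Char.ofNat (97 + u)) = some u := by
  revert hu; revert u; decide

-- the two character computations coincide on lowercase letters
lemma pv_charEq (c : Char) (v : Int) (hlo : 97 ≤ c.toNat) (hhi : c.toNat ≤ 122) :
    pvShiftChar c v
      = Char.ofNat (('a'.toNat : Int) + PySem.Int.mod (((c.toNat : Nat) : Int) - ('a'.toNat : Int) + v) 26).toNat := by
  have ha : ('a'.toNat : Int) = 97 := by decide
  obtain ⟨u, hu26, hcu⟩ : ∃ u : Nat, u < 26 ∧ c.toNat = 97 + u := ⟨c.toNat - 97, by omega, by omega⟩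
  have hc : c = Char.ofNat (97 + u) := by rw [← hcu, Char.ofNat_toNat]
  have hidx : PySem.List.index? pvLowercase c = some u := by rw [hc]; exact pv_alpha_index u hu26
  have harg : ((u : Nat) : Int) + v = ((c.toNat : Nat) : Int) - ('a'.toNat : Int) + v := by
    rw [ha]; omega
  unfold pvShiftChar
  rw [hidx, Option.getD_some, harg]
  set w : Int := PySem.Int.mod (((c.toNat : Nat) : Int) - ('a'.toNat : Int) + v) 26 with hw
  have hw0 : 0 ≤ w := PySem.Int.mod_nonneg _ (by omega)
  have hw26 : w < 26 := PySem.Int.mod_lt _ (by omega)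
  have hwcast : w = ((w.toNat : Nat) : Int) := by omega
  rw [hwcast, pv_alpha_get w.toNat (by omega), ha]
  congr 1

lemma pv_maxD_eq (roll : List Int) (h1 : ∀ x ∈ roll, 1 ≤ x) :
    PySem.List.maxD roll (fun x => x) 0 = roll.foldl max 0 := by
  cases hr : PySem.List.max? roll (fun x => x) with
  | none =>
      have : roll = [] := (PySem.List.max?_eq_none_iff _ _).1 hr
      subst this; rfl
  | some m =>
      have hmem := PySem.List.max?_mem hr
      have hmax := PySem.List.max?_isMax hr
      have h1 : 1 ≤ m := h1 m hmem
      have hle : roll.foldl max 0 ≤ m := pv_foldl_max_le roll 0 m (by omega) hmax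
      have hge : m ≤ roll.foldl max 0 := (PySem.List.le_foldl_max roll 0).2 m hmem
      simp only [PySem.List.maxD, hr, Option.getD_some]
      omega

-- Port A in closed form
lemma pv_A_closed (s : String) (roll : List Int) (h1 : ∀ x ∈ roll, 1 ≤ x) :
    rollTheString s roll = String.ofList
      ((List.range (min s.toList.length (roll.foldl max 0).toNat)).map
        (fun (k : Nat) => pvShiftChar (s.toList.getD k ' ') ((roll.countP (fun x => decide ((k : Int) < x)) : Int)))
       ++ s.toList.drop (roll.foldl max 0).toNat) := by
  have hfuelb : ∀ x ∈ roll, 1 ≤ x ∧ x ≤ ((roll.foldl (fun a x => max a x.toNat) 0 : Nat) : Int) := by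
    intro x hx
    have h2 := (PySem.List.le_foldl_max_nat roll (fun y => y.toNat) 0).2 x hx
    exact ⟨h1 x hx, by omega⟩
  simp only [rollTheString]
  rw [pv_shiftA_spec _ _ hfuelb, pv_wordA_spec]
  have hlen : ((List.range (roll.foldl max 0).toNat).map
      (fun (k : Nat) => (roll.countP (fun x => decide ((k : Int) < x)) : Int))).length
      = (roll.foldl max 0).toNat := by simp
  rw [hlen]
  simp only [Nat.sub_zero, Nat.zero_add]
  refine congrArg String.ofList (congrArg (fun l => l ++ s.toList.drop (roll.foldl max 0).toNat) ?_)
  apply List.map_congr_left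
  intro k hk
  have hkM : k < (roll.foldl max 0).toNat := by
    simp only [List.mem_range] at hk; omega
  rw [PySem.List.getD_map_range _ _ _ _ hkM]

-- Port B in closed form
lemma pv_B_closed (s : String) (roll : List Int) (h1 : ∀ x ∈ roll, 1 ≤ x) :
    rollTheString_alt s roll = String.ofList
      ((List.range (min (s.toList.length : Int) (roll.foldl max 0)).toNat).map
        (fun (k : Nat) => Char.ofNat (('a'.toNat : Int)
          + PySem.Int.mod (((s.toList.getD k ' ').toNat : Int) - ('a'.toNat : Int)
              + (roll.countP (fun x => decide ((k : Int) < x)) : Int)) 26).toNat)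
       ++ s.toList.drop (min (s.toList.length : Int) (roll.foldl max 0)).toNat) := by
  have hM0 : 0 ≤ roll.foldl max 0 := (PySem.List.le_foldl_max roll 0).1
  simp only [rollTheString_alt]
  rw [pv_maxD_eq roll h1]
  set cs := s.toList with hcs
  set M : Int := roll.foldl max 0 with hM
  set n : Int := min (cs.length : Int) M with hn
  have hn0 : 0 ≤ n := by omega
  have hhistlen : (roll.foldl
      (fun h x => if x ≤ n then PySem.List.pySetD h x (PySem.List.pyGetD h x 0 + 1) else h)
      (List.replicate (n.toNat + 1) (0 : Int))).length = n.toNat + 1 := by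
    rw [pv_hist_len]; simp
  have hhist : ∀ j : Int, 1 ≤ j → j ≤ n →
      PySem.List.pyGetD (roll.foldl
        (fun h x => if x ≤ n then PySem.List.pySetD h x (PySem.List.pyGetD h x 0 + 1) else h)
        (List.replicate (n.toNat + 1) (0 : Int))) j 0 = (roll.countP (fun x => x == j) : Int) := by
    intro j hj1 hjn
    rw [pv_hist_get n roll _ j h1 (by omega) hjn (by simp) (by omega)]
    have hz : PySem.List.pyGetD (List.replicate (n.toNat + 1) (0 : Int)) j 0 = 0 := by
      rw [PySem.List.pyGetD_eq_getElem _ _ (by omega) (by simp; omega)]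
      simp
    rw [hz]; omega
  have hcnt0 : (roll.length : Int) = pvCnt roll 0 := by
    unfold pvCnt
    congr 1
    symm
    apply List.countP_eq_length.2
    intro x hx
    simp only [decide_eq_true_eq]
    exact lt_of_lt_of_le (by omega) (h1 x hx)
  rw [hcnt0, pv_bloop cs _ roll n hhist 0 (by omega) hn0 []]
  rw [PySem.List.slice_from cs hn0]
  congr 1
  rw [List.nil_append, PySem.List.pyRange_one 0 n]
  rw [List.map_map]
  have hsub : (n - 0).toNat = n.toNat := by omega
  rw [hsub]
  refine congrArg (fun l => l ++ cs.drop n.toNat) ?_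
  apply List.map_congr_left
  intro k hk
  simp only [Function.comp_apply, zero_add]
  rw [PySem.List.pyGetD_natCast]
  rfl

-- the two closed forms coincide under Pre_
lemma pv_common (s : String) (roll : List Int) (hpre : Pre_rollTheString s roll) :
    rollTheString s roll = rollTheString_alt s roll := by
  have hpre' : ∀ x ∈ roll, 1 ≤ x ∧ ∀ c ∈ s.toList.take x.toNat, 97 ≤ c.toNat ∧ c.toNat ≤ 122 := by
    intro x hx
    have h := List.all_eq_true.mp hpre x hx
    simp only [Bool.and_eq_true, decide_eq_true_eq, List.all_eq_true] at h
    exact ⟨h.1, fun c hc => (h.2 c hc)⟩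
  have h1 : ∀ x ∈ roll, 1 ≤ x := fun x hx => (hpre' x hx).1
  have hM0 : 0 ≤ roll.foldl max 0 := (PySem.List.le_foldl_max roll 0).1
  rw [pv_A_closed s roll h1, pv_B_closed s roll h1]
  set cs := s.toList with hcs
  set M : Int := roll.foldl max 0 with hM
  have hntoNat : (min (cs.length : Int) M).toNat = min cs.length M.toNat := by omega
  have hlow : ∀ k : Nat, k < cs.length → k < M.toNat →
      97 ≤ (cs.getD k ' ').toNat ∧ (cs.getD k ' ').toNat ≤ 122 := by
    intro k hk hkM
    have hM1 : 1 ≤ M := by omega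
    have hMmem : M ∈ roll := by
      rcases PySem.List.foldl_max_mem roll 0 with h | h
      · omega
      · exact h
    have hk' : k < (cs.take M.toNat).length := by simp; omega
    have hmem : cs.getD k ' ' ∈ cs.take M.toNat := by
      rw [List.getD_eq_getElem cs ' ' hk]
      have hEq : (cs.take M.toNat)[k]'hk' = cs[k]'hk := List.getElem_take
      rw [← hEq]
      exact List.getElem_mem _
    exact (hpre' M hMmem).2 _ hmem
  have hdrop : cs.drop M.toNat = cs.drop (min cs.length M.toNat) := by
    by_cases hle : M.toNat ≤ cs.length
    · have heq : min cs.length M.toNat = M.toNat := by omega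
      rw [heq]
    · rw [List.drop_eq_nil_of_le (by omega), List.drop_eq_nil_of_le (by omega)]
  rw [hntoNat, hdrop]
  refine congrArg String.ofList (congrArg (fun l => l ++ cs.drop (min cs.length M.toNat)) ?_)
  apply List.map_congr_left
  intro k hk
  simp only [List.mem_range] at hk
  exact pv_charEq (cs.getD k ' ') _ (hlow k (by omega) (by omega)).1 (hlow k (by omega) (by omega)).2

-- ===== VERDICT (by name: the statement is the Claim_ definition above) =====
theorem rollTheString_spec : Claim_equal_rollTheString := by
  intro s roll _hdom hpre
  unfold Spec_rollTheString
  exact pv_common s roll hpre
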